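-- pv_equiv track=rewrite | github.com/nithinrdy/fettle-scraper | bashable_scripts/scraper_script.py | clean_square_brackets
-- ===== SOURCE A (Python) =====
-- def clean_square_brackets(x):
--     if '[' not in x:
--         return x
--     else:
--         cleaned_up = ''
--         opening_split = x.split('[')
--         for item in opening_split:
--             closing_split = item.split(']')
--             for phrase in closing_split:
--                 if len(phrase) > len(cleaned_up):
--                     cleaned_up = phrase
--         return cleaned_up
-- ===== SOURCE B (Python) =====
-- def clean_square_brackets(x):
--     if '[' not in x:
--         return x
--     best = ''
--     current = ''
--     for c in x:
--         if c == '[' or c == ']':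
--             if len(current) > len(best):
--                 best = current
--             current = ''
--         else:
--             current += c
--     return current if len(current) > len(best) else best
-- ===== Notes on version B (the rewrite author's own statement) =====
-- stated objective: simpler
-- what changed: Replaces the nested split-on-opening-bracket then split-on-closing-bracket passes that materialise lists of pieces with a single online left-to-right scan keeping the current segment and the best-so-far segment.
import Mathlib
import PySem

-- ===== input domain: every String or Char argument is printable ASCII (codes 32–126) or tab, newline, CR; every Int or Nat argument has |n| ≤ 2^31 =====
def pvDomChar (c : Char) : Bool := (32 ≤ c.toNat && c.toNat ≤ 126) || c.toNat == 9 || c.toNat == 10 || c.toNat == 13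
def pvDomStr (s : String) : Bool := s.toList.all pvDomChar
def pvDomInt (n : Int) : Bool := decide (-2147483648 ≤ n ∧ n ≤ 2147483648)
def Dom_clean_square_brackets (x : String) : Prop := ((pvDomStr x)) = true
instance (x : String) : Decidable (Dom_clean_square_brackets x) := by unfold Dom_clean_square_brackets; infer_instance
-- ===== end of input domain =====

-- B replaces A's nested bracket-splitting passes with a single online scan; objective: simpler.

-- ===== PORT A =====
def clean_square_brackets (x : String) : String :=
  if PySem.Str.isIn "[" x = false then x
  else
    let opening_split := PySem.Chars.splitOn x.toList ['[']
    String.ofList (opening_split.foldl (fun cleaned item =>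
      (PySem.Chars.splitOn item [']']).foldl (fun cleaned phrase =>
        if phrase.length > cleaned.length then phrase else cleaned) cleaned) [])

-- ===== PORT B =====
def clean_square_brackets_alt (x : String) : String :=
  if PySem.Str.isIn "[" x = false then x
  else
    let st := x.toList.foldl (fun (st : List Char × List Char) c =>
      if c = '[' ∨ c = ']' then
        (if st.2.length > st.1.length then st.2 else st.1, [])
      else (st.1, st.2 ++ [c])) ([], [])
    String.ofList (if st.2.length > st.1.length then st.2 else st.1)

-- ===== PRECONDITION & SPEC =====
def Spec_clean_square_brackets (x : String) (out : String) : Prop := out = clean_square_brackets_alt x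
instance (x : String) (out : String) : Decidable (Spec_clean_square_brackets x out) := by unfold Spec_clean_square_brackets; infer_instance

-- ===== CLAIM (what is proved, stated in full; the proofs are below) =====
def Claim_equal_clean_square_brackets : Prop := ∀ (x : String), Dom_clean_square_brackets x → Spec_clean_square_brackets x (clean_square_brackets x)

-- ===== LEMMAS AND PROOFS =====

-- "cons onto the head piece" (the accumulator pattern of splitting)
def pvHC (c : Char) : List (List Char) → List (List Char)
  | [] => [[c]]
  | h :: t => (c :: h) :: t

-- "prepend to the head piece"
def pvHP (p : List Char) : List (List Char) → List (List Char)
  | [] => [p]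
  | h :: t => (p ++ h) :: t

-- structural split on one character
def pvSplitA (a : Char) : List Char → List (List Char)
  | [] => [[]]
  | c :: cs => if c = a then [] :: pvSplitA a cs else pvHC c (pvSplitA a cs)

-- structural split on both brackets
def pvSegs : List Char → List (List Char)
  | [] => [[]]
  | c :: cs => if c = '[' ∨ c = ']' then [] :: pvSegs cs else pvHC c (pvSegs cs)

-- the "keep the longer" update
def pvUpd (b p : List Char) : List Char := if p.length > b.length then p else b

theorem pvHC_cons (c : Char) (h : List Char) (t : List (List Char)) :
    pvHC c (h :: t) = (c :: h) :: t := rfl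

theorem pvHP_cons (p h : List Char) (t : List (List Char)) :
    pvHP p (h :: t) = (p ++ h) :: t := rfl

theorem pvSplitA_ne_nil (a : Char) (cs : List Char) : pvSplitA a cs ≠ [] := by
  cases cs with
  | nil => simp [pvSplitA]
  | cons c cs =>
    simp only [pvSplitA]
    split
    · simp
    · cases h : pvSplitA a cs <;> simp [pvHC]

theorem pvSegs_ne_nil (cs : List Char) : pvSegs cs ≠ [] := by
  cases cs with
  | nil => simp [pvSegs]
  | cons c cs =>
    simp only [pvSegs]
    split
    · simp
    · cases h : pvSegs cs <;> simp [pvHC]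

theorem pvHP_nil (l : List (List Char)) (h : l ≠ []) : pvHP [] l = l := by
  cases l with
  | nil => exact absurd rfl h
  | cons a t => simp [pvHP]

theorem pvHC_append (c : Char) (l m : List (List Char)) (h : l ≠ []) :
    pvHC c l ++ m = pvHC c (l ++ m) := by
  cases l with
  | nil => exact absurd rfl h
  | cons a t => simp [pvHC]

theorem pv_go_spec (a : Char) : ∀ (fuel : Nat) (l cur : List Char) (acc : List (List Char)),
    l.length ≤ fuel →
    PySem.Chars.splitOn.go [a] fuel l cur acc = acc.reverse ++ pvHP cur.reverse (pvSplitA a l) := by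
  intro fuel
  induction fuel with
  | zero =>
    intro l cur acc hl
    have : l = [] := List.eq_nil_of_length_eq_zero (Nat.le_zero.mp hl)
    subst this
    simp [PySem.Chars.splitOn.go, pvSplitA, pvHP]
  | succ n ih =>
    intro l cur acc hl
    cases l with
    | nil => simp [PySem.Chars.splitOn.go, pvSplitA, pvHP]
    | cons c rest =>
      by_cases hca : c = a
      · subst hca
        have hpre : List.isPrefixOf [c] (c :: rest) = true := by simp [List.isPrefixOf]
        rw [show PySem.Chars.splitOn.go [c] (n+1) (c :: rest) cur acc
              = PySem.Chars.splitOn.go [c] n rest [] (cur.reverse :: acc) by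
            simp [PySem.Chars.splitOn.go, hpre]]
        rw [ih rest [] (cur.reverse :: acc) (by simpa using Nat.le_of_succ_le_succ hl)]
        have h1 : pvSplitA c (c :: rest) = [] :: pvSplitA c rest := by simp [pvSplitA]
        rw [h1]
        cases h : pvSplitA c rest with
        | nil => exact absurd h (pvSplitA_ne_nil c rest)
        | cons hh tt => simp [pvHP]
      · have hpre : List.isPrefixOf [a] (c :: rest) = false := by
          simp [List.isPrefixOf]
          exact fun h => absurd h.symm hca
        rw [show PySem.Chars.splitOn.go [a] (n+1) (c :: rest) cur acc
              = PySem.Chars.splitOn.go [a] n rest (c :: cur) acc by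
            simp [PySem.Chars.splitOn.go, hpre]]
        rw [ih rest (c :: cur) acc (by simpa using Nat.le_of_succ_le_succ hl)]
        have h1 : pvSplitA a (c :: rest) = pvHC c (pvSplitA a rest) := by
          simp [pvSplitA, hca]
        rw [h1]
        cases h : pvSplitA a rest with
        | nil => exact absurd h (pvSplitA_ne_nil a rest)
        | cons hh tt => simp [pvHP, pvHC]

theorem pv_splitOn_single (a : Char) (cs : List Char) :
    PySem.Chars.splitOn cs [a] = pvSplitA a cs := by
  rw [show PySem.Chars.splitOn cs [a] = PySem.Chars.splitOn.go [a] (cs.length + 1) cs [] [] from rfl]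
  rw [pv_go_spec a (cs.length + 1) cs [] [] (Nat.le_succ _)]
  simp [pvHP_nil _ (pvSplitA_ne_nil a cs)]

theorem pv_flatMap_split (cs : List Char) :
    (pvSplitA '[' cs).flatMap (pvSplitA ']') = pvSegs cs := by
  induction cs with
  | nil => simp [pvSplitA, pvSegs]
  | cons c cs ih =>
    by_cases h1 : c = '['
    · subst h1
      simp [pvSplitA, pvSegs, ih]
    · by_cases h2 : c = ']'
      · subst h2
        have hs : pvSplitA '[' (']' :: cs) = pvHC ']' (pvSplitA '[' cs) := by
          simp [pvSplitA]
        rw [hs]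
        cases h : pvSplitA '[' cs with
        | nil => exact absurd h (pvSplitA_ne_nil _ cs)
        | cons hh tt =>
          have hseg : pvSegs (']' :: cs) = [] :: pvSegs cs := by simp [pvSegs]
          rw [hseg, ← ih, h, pvHC_cons]
          simp only [List.flatMap_cons]
          have : pvSplitA ']' (']' :: hh) = [] :: pvSplitA ']' hh := by simp [pvSplitA]
          rw [this]
          simp
      · have hs : pvSplitA '[' (c :: cs) = pvHC c (pvSplitA '[' cs) := by
          simp [pvSplitA, h1]
        rw [hs]
        cases h : pvSplitA '[' cs with
        | nil => exact absurd h (pvSplitA_ne_nil _ cs)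
        | cons hh tt =>
          have hseg : pvSegs (c :: cs) = pvHC c (pvSegs cs) := by
            simp [pvSegs, h1, h2]
          rw [hseg, ← ih, h, pvHC_cons]
          simp only [List.flatMap_cons]
          have hsplit : pvSplitA ']' (c :: hh) = pvHC c (pvSplitA ']' hh) := by
            simp [pvSplitA, h2]
          rw [hsplit, pvHC_append c _ _ (pvSplitA_ne_nil ']' hh)]

theorem pv_foldl_flatMap (f : List Char → List (List Char)) :
    ∀ (L : List (List Char)) (b : List Char),
    L.foldl (fun b item => (f item).foldl pvUpd b) b = (L.flatMap f).foldl pvUpd b := by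
  intro L
  induction L with
  | nil => intro b; simp
  | cons h t ih => intro b; simp [List.flatMap_cons, List.foldl_append, ih]

theorem pv_scan_invariant : ∀ (cs b cur : List Char),
    pvUpd
      (cs.foldl (fun (st : List Char × List Char) c =>
        if c = '[' ∨ c = ']' then
          (if st.2.length > st.1.length then st.2 else st.1, [])
        else (st.1, st.2 ++ [c])) (b, cur)).1
      (cs.foldl (fun (st : List Char × List Char) c =>
        if c = '[' ∨ c = ']' then
          (if st.2.length > st.1.length then st.2 else st.1, [])
        else (st.1, st.2 ++ [c])) (b, cur)).2
    = (pvHP cur (pvSegs cs)).foldl pvUpd b := by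
  intro cs
  induction cs with
  | nil => intro b cur; simp [pvSegs, pvHP, pvUpd]
  | cons c cs ih =>
    intro b cur
    by_cases hc : c = '[' ∨ c = ']'
    · simp only [List.foldl_cons, if_pos hc]
      rw [ih, pvHP_nil _ (pvSegs_ne_nil cs)]
      rw [show pvSegs (c :: cs) = [] :: pvSegs cs from by simp [pvSegs, hc]]
      simp only [pvHP_cons, List.foldl_cons, List.append_nil]
      rfl
    · simp only [List.foldl_cons, if_neg hc]
      rw [ih]
      rw [show pvSegs (c :: cs) = pvHC c (pvSegs cs) from by simp [pvSegs, hc]]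
      cases h : pvSegs cs with
      | nil => exact absurd h (pvSegs_ne_nil cs)
      | cons hh tt => simp [pvHP_cons, pvHC_cons]

-- ===== VERDICT (by name: the statement is the Claim_ definition above) =====
theorem clean_square_brackets_spec : Claim_equal_clean_square_brackets := by
  intro x _
  unfold Spec_clean_square_brackets clean_square_brackets clean_square_brackets_alt
  by_cases hg : PySem.Str.isIn "[" x = false
  · rw [if_pos hg, if_pos hg]
  · rw [if_neg hg, if_neg hg]
    have hA : (PySem.Chars.splitOn x.toList ['[']).foldl
        (fun cleaned item => (PySem.Chars.splitOn item [']']).foldl pvUpd cleaned) []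
        = List.foldl pvUpd [] (pvSegs x.toList) := by
      simp only [pv_splitOn_single]
      rw [pv_foldl_flatMap, pv_flatMap_split]
    have hB := pv_scan_invariant x.toList [] []
    rw [pvHP_nil _ (pvSegs_ne_nil x.toList)] at hB
    exact congrArg String.ofList (hA.trans hB.symm)
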